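-- pv_equiv track=rewrite | github.com/mys1erious/krok | Year 1/Python/lab5/ind 3.b.py | deletes_from_given_sequence
-- ===== SOURCE A (Python) =====
-- def deletes_from_given_sequence(sentence, toDel):
--
--     # Deletes all words from given list in which letters sequentially arranged with beggining of UA alphabet.
--
--     sentenceCopy = sentence.copy()
--     sentenceCopy2 = sentence.copy()
--     length = len(sentence)
--
--     toDelList = list(toDel)
--     toDelCopy = toDelList.copy()
--
--     for i in range(length):
--         taken = sentenceCopy2.pop()
--         for j in range(len(toDelList)):
--             str = ''.join(toDelList)
--             if taken == str:
--                 sentenceCopy.remove(taken)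
--             toDelList.pop()
--         toDelList = toDelCopy.copy()
--     return sentenceCopy
-- ===== SOURCE B (Python) =====
-- def deletes_from_given_sequence(sentence, toDel):
--     # Build the set of all non-empty prefix-joins of toDel once, then one filtering pass.
--     prefixes = set()
--     acc = ''
--     for part in toDel:
--         acc += part
--         prefixes.add(acc)
--     return [w for w in sentence if w not in prefixes]
-- ===== Notes on version B (the rewrite author's own statement) =====
-- stated objective: faster
-- what changed: A re-joins every prefix of toDel from scratch inside a nested loop and deletes matches with repeated list.remove scans; B builds the set of prefix-joins once by a single accumulating pass and filters sentence in one pass.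
-- crash fix: When two prefix-joins of toDel coincide (toDel contains an empty string after the first element) and that join occurs in sentence, A calls list.remove more often than the word occurs and raises ValueError; B simply returns the filtered list there. — e.g. on deletes_from_given_sequence(["a"], ["a", ""]): A raises ValueError, B returns []
import Mathlib
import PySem

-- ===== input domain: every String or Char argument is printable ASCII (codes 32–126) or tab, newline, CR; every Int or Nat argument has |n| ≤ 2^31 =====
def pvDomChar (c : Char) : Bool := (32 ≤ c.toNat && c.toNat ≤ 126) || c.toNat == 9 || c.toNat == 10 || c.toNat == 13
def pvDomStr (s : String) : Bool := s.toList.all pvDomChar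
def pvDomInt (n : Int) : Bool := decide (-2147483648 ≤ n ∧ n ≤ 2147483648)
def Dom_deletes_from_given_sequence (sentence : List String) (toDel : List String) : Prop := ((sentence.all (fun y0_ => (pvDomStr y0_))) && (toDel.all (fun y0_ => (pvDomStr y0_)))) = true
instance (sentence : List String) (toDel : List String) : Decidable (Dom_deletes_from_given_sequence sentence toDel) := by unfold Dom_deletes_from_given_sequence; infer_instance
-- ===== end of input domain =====

-- B builds the set of prefix-joins of toDel once and filters sentence in one pass,
-- replacing A's nested re-join/remove loops (objective: faster).


-- ===== PORT A =====
-- inner loop: for j in range(len(toDelList)): str = ''.join(toDelList); if taken == str: sentenceCopy.remove(taken); toDelList.pop()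
-- (list.remove raises ValueError when the value is absent: Pre_ excludes those inputs; the .getD is a totality guard only)
def pvInnerA (taken : String) : Nat → List String → List String → List String
  | 0, sc, _ => sc
  | j + 1, sc, tl =>
      let s := PySem.Str.join "" tl
      let sc' := if taken == s then (PySem.List.remove? sc taken).getD sc else sc
      pvInnerA taken j sc' tl.dropLast

-- outer loop: for i in range(length): taken = sentenceCopy2.pop(); <inner loop>; toDelList = toDelCopy.copy()
def pvOuterA (toDelCopy : List String) : Nat → List String → List String → List String
  | 0, sc, _ => sc
  | n + 1, sc, sc2 =>
      match PySem.List.pop? sc2 with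
      | none => sc
      | some (taken, sc2') => pvOuterA toDelCopy n (pvInnerA taken toDelCopy.length sc toDelCopy) sc2'

def deletes_from_given_sequence (sentence : List String) (toDel : List String) : List String :=
  pvOuterA toDel sentence.length sentence sentence

-- ===== PORT B =====
def deletes_from_given_sequence_alt (sentence : List String) (toDel : List String) : List String :=
  let st := toDel.foldl
    (fun (st : PySem.Set String × String) part => (PySem.Set.add st.1 (st.2 ++ part), st.2 ++ part))
    (PySem.Set.empty, "")
  sentence.filter (fun w => !(PySem.Set.contains st.1 w))

-- ===== PRECONDITION & SPEC =====
-- the strings ''.join(toDel[:k+1]) for k < len(toDel) (helper for Pre_/Raises_)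
def pvJoinsFrom (a : String) : List String → List String
  | [] => []
  | p :: t => (a ++ p) :: pvJoinsFrom (a ++ p) t

-- Pre_ excludes exactly the inputs on which A raises: two prefix-joins of toDel coincide (toDel has an
-- empty component after the first) and that string occurs in sentence, so A's list.remove is called more
-- often than the word occurs and raises ValueError.
def Pre_deletes_from_given_sequence (sentence : List String) (toDel : List String) : Prop :=
  ∀ w ∈ sentence, (pvJoinsFrom "" toDel).count w ≤ 1
instance (sentence : List String) (toDel : List String) : Decidable (Pre_deletes_from_given_sequence sentence toDel) := by unfold Pre_deletes_from_given_sequence; infer_instance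

def pvWitness_deletes_from_given_sequence : List String × List String := (["ab", "a", "x", "ab"], ["a", "b"])

-- On inputs where some word of sentence equals a duplicated prefix-join of toDel, A raises ValueError; B returns the filtered list.
def Raises_deletes_from_given_sequence (sentence : List String) (toDel : List String) : Prop :=
  ∃ w ∈ sentence, 2 ≤ (pvJoinsFrom "" toDel).count w
instance (sentence : List String) (toDel : List String) : Decidable (Raises_deletes_from_given_sequence sentence toDel) := by unfold Raises_deletes_from_given_sequence; infer_instance
def pvRaiseWitness_deletes_from_given_sequence : List String × List String := (["a"], ["a", ""])
def pvRaiseWitnessOut_deletes_from_given_sequence : List String := []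

def Spec_deletes_from_given_sequence (sentence : List String) (toDel : List String) (out : List String) : Prop := out = deletes_from_given_sequence_alt sentence toDel
instance (sentence : List String) (toDel : List String) (out : List String) : Decidable (Spec_deletes_from_given_sequence sentence toDel out) := by unfold Spec_deletes_from_given_sequence; infer_instance

-- ===== CLAIM (what is proved, stated in full; the proofs are below) =====
def Claim_equal_deletes_from_given_sequence : Prop := ∀ (sentence : List String) (toDel : List String), Dom_deletes_from_given_sequence sentence toDel → Pre_deletes_from_given_sequence sentence toDel → Spec_deletes_from_given_sequence sentence toDel (deletes_from_given_sequence sentence toDel)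

def Claim_raises_deletes_from_given_sequence : Prop := (∀ (sentence : List String) (toDel : List String), Dom_deletes_from_given_sequence sentence toDel → Raises_deletes_from_given_sequence sentence toDel → ¬ Pre_deletes_from_given_sequence sentence toDel) ∧ (Dom_deletes_from_given_sequence (pvRaiseWitness_deletes_from_given_sequence.1) (pvRaiseWitness_deletes_from_given_sequence.2) ∧ Raises_deletes_from_given_sequence (pvRaiseWitness_deletes_from_given_sequence.1) (pvRaiseWitness_deletes_from_given_sequence.2) ∧ deletes_from_given_sequence_alt (pvRaiseWitness_deletes_from_given_sequence.1) (pvRaiseWitness_deletes_from_given_sequence.2) = pvRaiseWitnessOut_deletes_from_given_sequence)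

-- ===== LEMMAS AND PROOFS =====

theorem pvRemoveD_eq_erase (sc : List String) (v : String) :
    (PySem.List.remove? sc v).getD sc = sc.erase v := by
  by_cases h : v ∈ sc
  · rw [PySem.List.remove?_eq_some_erase sc v h]; rfl
  · rw [(PySem.List.remove?_eq_none_iff sc v).2 h, List.erase_of_not_mem h]; rfl

-- the joins A's inner loop compares against, in the order A computes them (full join first)
def pvJoinsDescF : Nat → List String → List String
  | 0, _ => []
  | j + 1, tl => PySem.Str.join "" tl :: pvJoinsDescF j tl.dropLast

theorem pvInnerA_eq_foldl (taken : String) :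
    ∀ (j : Nat) (tl sc : List String),
      pvInnerA taken j sc tl =
        (pvJoinsDescF j tl).foldl
          (fun sc s => if taken == s then (PySem.List.remove? sc taken).getD sc else sc) sc := by
  intro j
  induction j with
  | zero => intro tl sc; rfl
  | succ j ih => intro tl sc; simp only [pvInnerA, pvJoinsDescF, List.foldl_cons, ih]

theorem pvFoldl_erase_once (taken : String) :
    ∀ (L : List String) (sc : List String), L.count taken ≤ 1 →
      L.foldl (fun sc s => if taken == s then sc.erase taken else sc) sc =
        if taken ∈ L then sc.erase taken else sc := by
  intro L
  induction L with
  | nil => intro sc _; simp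
  | cons s rest ih =>
    intro sc hc
    by_cases hs : taken = s
    · subst hs
      have hcnt : rest.count taken = 0 := by
        simp [List.count_cons] at hc; omega
      have hnot : taken ∉ rest := List.count_eq_zero.mp hcnt
      simp only [List.foldl_cons, BEq.rfl, if_true]
      rw [PySem.List.foldl_congr_mem rest _ (fun acc _ => acc) _ ?_]
      · rw [PySem.List.foldl_ignore]; simp
      · intro acc x hx
        have hne : (taken == x) = false := beq_eq_false_iff_ne.2 (fun h => hnot (h ▸ hx))
        simp [hne]
    · have hne : (taken == s) = false := beq_eq_false_iff_ne.2 hs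
      simp only [List.foldl_cons, hne, Bool.false_eq_true, if_false]
      rw [ih sc (by simp [List.count_cons, hne] at hc ⊢; omega)]
      simp [List.mem_cons, hs]

theorem pvInnerA_eq_ite (tl : List String) (taken : String) (sc : List String)
    (h : (pvJoinsDescF tl.length tl).count taken ≤ 1) :
    pvInnerA taken tl.length sc tl =
      if taken ∈ pvJoinsDescF tl.length tl then sc.erase taken else sc := by
  rw [pvInnerA_eq_foldl]
  rw [PySem.List.foldl_congr_mem _ _ (fun sc s => if taken == s then sc.erase taken else sc) _ ?_]
  · exact pvFoldl_erase_once taken _ sc h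
  · intro acc x _
    by_cases hx : (taken == x) = true <;> simp [hx, pvRemoveD_eq_erase]

theorem pvJoinsFrom_snoc : ∀ (t : List String) (x a : String),
    pvJoinsFrom a (t ++ [x]) = pvJoinsFrom a t ++ [t.foldl (· ++ ·) a ++ x] := by
  intro t
  induction t with
  | nil => intro x a; simp [pvJoinsFrom]
  | cons p t' ih => intro x a; simp [pvJoinsFrom, ih]

theorem pvJoin_toList : ∀ l : List String,
    (PySem.Str.join "" l).toList = (l.map String.toList).flatten := by
  intro l
  induction l with
  | nil => simp [PySem.Str.toList_join, PySem.Chars.join_nil]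
  | cons p t ih =>
    cases t with
    | nil => simp [PySem.Str.toList_join, PySem.Chars.join_singleton]
    | cons q r =>
      rw [PySem.Str.toList_join] at ih ⊢
      simp only [List.map_cons] at ih ⊢
      rw [show ("" : String).toList = [] from rfl] at ih ⊢
      rw [PySem.Chars.join_cons_cons, ih]
      simp

theorem pvFoldl_append_toList : ∀ (l : List String) (a : String),
    (l.foldl (· ++ ·) a).toList = a.toList ++ (l.map String.toList).flatten := by
  intro l
  induction l with
  | nil => intro a; simp
  | cons p t ih => intro a; simp [ih, String.toList_append, List.append_assoc]

theorem pvJoin_eq_foldl (l : List String) :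
    PySem.Str.join "" l = l.foldl (· ++ ·) "" := by
  apply String.toList_inj.mp
  rw [pvJoin_toList, pvFoldl_append_toList]
  rfl

theorem pvDesc_eq_reverse : ∀ tl : List String,
    pvJoinsDescF tl.length tl = (pvJoinsFrom "" tl).reverse := by
  intro tl
  induction tl using List.reverseRecOn with
  | nil => rfl
  | append_singleton t x ih =>
    have hlen : (t ++ [x]).length = t.length + 1 := by simp
    rw [hlen]
    show PySem.Str.join "" (t ++ [x]) :: pvJoinsDescF t.length (t ++ [x]).dropLast = _
    rw [List.dropLast_concat, ih, pvJoinsFrom_snoc, pvJoin_eq_foldl, List.foldl_append]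
    simp

theorem pvOuterA_eq_foldl (tl : List String) : ∀ (xs sc : List String),
    pvOuterA tl xs.length sc xs =
      xs.reverse.foldl (fun sc x => pvInnerA x tl.length sc tl) sc := by
  intro xs
  induction xs using List.reverseRecOn with
  | nil => intro sc; rfl
  | append_singleton ys x ih =>
    intro sc
    have hlen : (ys ++ [x]).length = ys.length + 1 := by simp
    rw [hlen]
    show (match PySem.List.pop? (ys ++ [x]) with
      | none => sc
      | some (taken, sc2') => pvOuterA tl ys.length (pvInnerA taken tl.length sc tl) sc2') = _
    rw [PySem.List.pop?_last]
    show pvOuterA tl ys.length (pvInnerA x tl.length sc tl) ys = _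
    rw [ih]
    simp

theorem pvFoldl_step_spec (J : List String) : ∀ (xs sc : List String),
    (xs.reverse.foldl (fun sc x => if x ∈ J then sc.erase x else sc) sc).Sublist sc ∧
    ∀ v : String,
      (xs.reverse.foldl (fun sc x => if x ∈ J then sc.erase x else sc) sc).count v
        = sc.count v - (if v ∈ J then xs.count v else 0) := by
  intro xs
  induction xs with
  | nil => intro sc; simp
  | cons x t ih =>
    intro sc
    obtain ⟨ihsub, ihcnt⟩ := ih sc
    rw [show (x :: t).reverse = t.reverse ++ [x] from by simp, List.foldl_append]
    constructor
    · by_cases hx : x ∈ J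
      · simp only [hx, if_true, List.foldl_cons, List.foldl_nil]
        exact List.Sublist.trans List.erase_sublist ihsub
      · simpa [hx] using ihsub
    · intro v
      by_cases hx : x ∈ J
      · simp only [hx, if_true, List.foldl_cons, List.foldl_nil, List.count_erase, ihcnt v]
        by_cases hv : v ∈ J
        · simp only [hv, if_true, List.count_cons]
          by_cases hxv : x = v
          · subst hxv; simp [Nat.sub_sub]
          · have : (x == v) = false := beq_eq_false_iff_ne.2 hxv
            have : (v == x) = false := beq_eq_false_iff_ne.2 (fun h => hxv h.symm)
            simp_all
        · have hxv : (x == v) = false :=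
            beq_eq_false_iff_ne.2 (fun h => hv (h ▸ hx))
          simp [hv, hxv, ihcnt v]
      · have hstep : ∀ r : List String,
            List.foldl (fun sc x => if x ∈ J then sc.erase x else sc) r [x] = r := by
          intro r; simp [hx]
        rw [hstep, ihcnt v]
        by_cases hv : v ∈ J
        · have hvx : (v == x) = false := beq_eq_false_iff_ne.2 (fun h => hx (h ▸ hv))
          have hxv : ¬ (x = v) := fun h => hx (h ▸ hv)
          simp [hv, List.count_cons, hvx, hxv]
        · simp [hv]

theorem pvSublist_count_filter (J : List String) : ∀ (s r : List String),
    r.Sublist s →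
    (∀ v : String, r.count v = if v ∈ J then 0 else s.count v) →
    r = s.filter (fun w => !decide (w ∈ J)) := by
  intro s
  induction s with
  | nil => intro r hs _; simp [List.sublist_nil.mp hs]
  | cons a s' ih =>
    intro r hs hc
    rcases List.sublist_cons_iff.mp hs with h | ⟨r', rfl, hr'⟩
    · by_cases ha : a ∈ J
      · have hc' : ∀ v : String, r.count v = if v ∈ J then 0 else s'.count v := by
          intro v
          by_cases hv : v ∈ J
          · simpa [hv] using hc v
          · have hav : ¬ (a = v) := fun h => hv (h ▸ ha)
            have := hc v
            simp [hv, List.count_cons, hav] at this ⊢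
            exact this
        rw [ih r h hc']
        simp [List.filter_cons, ha]
      · exfalso
        have h1 : r.count a ≤ s'.count a := h.count_le a
        have h2 := hc a
        simp [ha, List.count_cons] at h2
        omega
    · by_cases ha : a ∈ J
      · exfalso
        have := hc a
        simp [ha, List.count_cons] at this
      · have hc' : ∀ v : String, r'.count v = if v ∈ J then 0 else s'.count v := by
          intro v
          have := hc v
          by_cases hv : v ∈ J
          · have hav : ¬ (a = v) := fun h => ha (h ▸ hv)
            simp [hv, List.count_cons, hav] at this ⊢
            exact this
          · simp [hv, List.count_cons] at this ⊢
            omega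
        rw [ih r' hr' hc']
        simp [List.filter_cons, ha]

theorem pvAltSet_mem : ∀ (tl : List String) (s : PySem.Set String) (a x : String),
    (x ∈ (tl.foldl
        (fun (st : PySem.Set String × String) part => (PySem.Set.add st.1 (st.2 ++ part), st.2 ++ part))
        (s, a)).1) ↔ (x ∈ s ∨ x ∈ pvJoinsFrom a tl) := by
  intro tl
  induction tl with
  | nil => intro s a x; simp [pvJoinsFrom]
  | cons p t ih =>
    intro s a x
    simp only [List.foldl_cons]
    rw [ih, PySem.Set.mem_add]
    simp only [pvJoinsFrom, List.mem_cons]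
    tauto

theorem pvAlt_eq_filter (sentence toDel : List String) :
    deletes_from_given_sequence_alt sentence toDel
      = sentence.filter (fun w => !decide (w ∈ pvJoinsFrom "" toDel)) := by
  unfold deletes_from_given_sequence_alt
  apply List.filter_congr
  intro w _
  have hm := pvAltSet_mem toDel PySem.Set.empty "" w
  congr 1
  by_cases h : w ∈ pvJoinsFrom "" toDel
  · have hct := (PySem.Set.contains_iff
      (toDel.foldl (fun (st : PySem.Set String × String) part =>
        (PySem.Set.add st.1 (st.2 ++ part), st.2 ++ part)) (PySem.Set.empty, "")).1 w).2
      (hm.2 (Or.inr h))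
    rw [hct, decide_eq_true h]
  · have hct : PySem.Set.contains
        (toDel.foldl (fun (st : PySem.Set String × String) part =>
          (PySem.Set.add st.1 (st.2 ++ part), st.2 ++ part)) (PySem.Set.empty, "")).1 w = false := by
      cases hc : PySem.Set.contains
        (toDel.foldl (fun (st : PySem.Set String × String) part =>
          (PySem.Set.add st.1 (st.2 ++ part), st.2 ++ part)) (PySem.Set.empty, "")).1 w
      · rfl
      · rcases hm.1 ((PySem.Set.contains_iff _ w).1 hc) with h' | h'
        · exact absurd h' List.not_mem_nil
        · exact absurd h' h
    rw [hct, decide_eq_false h]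

theorem pvA_eq_filter (sentence toDel : List String)
    (hpre : Pre_deletes_from_given_sequence sentence toDel) :
    deletes_from_given_sequence sentence toDel
      = sentence.filter (fun w => !decide (w ∈ pvJoinsFrom "" toDel)) := by
  unfold deletes_from_given_sequence
  rw [pvOuterA_eq_foldl]
  rw [PySem.List.foldl_congr_mem _ _
    (fun sc x => if x ∈ pvJoinsFrom "" toDel then sc.erase x else sc) _ ?_]
  · obtain ⟨hsub, hcnt⟩ := pvFoldl_step_spec (pvJoinsFrom "" toDel) sentence sentence
    apply pvSublist_count_filter _ sentence _ hsub
    intro v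
    rw [hcnt v]
    by_cases hv : v ∈ pvJoinsFrom "" toDel <;> simp [hv]
  · intro acc x hx
    have hx' : x ∈ sentence := List.mem_reverse.mp hx
    have hcd : (pvJoinsDescF toDel.length toDel).count x ≤ 1 := by
      rw [pvDesc_eq_reverse, List.count_reverse]
      exact hpre x hx'
    rw [pvInnerA_eq_ite _ _ _ hcd, pvDesc_eq_reverse]
    simp [List.mem_reverse]

-- ===== VERDICT (by name: the statement is the Claim_ definition above) =====
theorem deletes_from_given_sequence_spec : Claim_equal_deletes_from_given_sequence := by
  intro sentence toDel _ hpre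
  unfold Spec_deletes_from_given_sequence
  rw [pvA_eq_filter sentence toDel hpre, pvAlt_eq_filter]

@[simp] theorem deletes_from_given_sequence_raises : Claim_raises_deletes_from_given_sequence := by
  unfold Claim_raises_deletes_from_given_sequence
  refine ⟨?_, by decide⟩
  rintro sentence toDel _ ⟨w, hw, h2⟩ hpre
  have := hpre w hw
  omega
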